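-- pv_equiv track=rewrite | github.com/mackimart1/AgentKen | core/adaptive_orchestrator.py | _find_parallel_groups
-- ===== SOURCE A (Python) =====
-- from typing import Dict, List, Optional, Any, Callable, Set, Tuple
--
-- def _find_parallel_groups(
--     dependency_graph: Dict[str, Set[str]]
-- ) -> List[Set[str]]:
--     """Find groups of tasks that can run in parallel"""
--
--     # Find all tasks that are dependencies of others
--     dependent_tasks = set()
--     for dependents in dependency_graph.values():
--         dependent_tasks.update(dependents)
--
--     # Find tasks with no outgoing dependencies (potential parallel tasks)
--     all_tasks = set(dependency_graph.keys())
--     independent_tasks = all_tasks - dependent_tasks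
--
--     # Group independent tasks as a parallel group
--     parallel_groups = [independent_tasks] if independent_tasks else []
--
--     return parallel_groups
-- ===== SOURCE B (Python) =====
-- def _find_parallel_groups(dependency_graph):
--     """Find groups of tasks that can run in parallel"""
--     # A task is independent iff it is not a dependency of any task.
--     independent = {
--         t for t in dependency_graph
--         if not any(t in deps for deps in dependency_graph.values())
--     }
--     return [independent] if independent else []
-- ===== Notes on version B (the rewrite author's own statement) =====
-- stated objective: simpler
-- what changed: B drops A's pre-built union-of-dependents set and its set difference: each key is kept directly iff it occurs in none of the dependency sets, via one comprehension with an any-scan.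
import Mathlib
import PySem

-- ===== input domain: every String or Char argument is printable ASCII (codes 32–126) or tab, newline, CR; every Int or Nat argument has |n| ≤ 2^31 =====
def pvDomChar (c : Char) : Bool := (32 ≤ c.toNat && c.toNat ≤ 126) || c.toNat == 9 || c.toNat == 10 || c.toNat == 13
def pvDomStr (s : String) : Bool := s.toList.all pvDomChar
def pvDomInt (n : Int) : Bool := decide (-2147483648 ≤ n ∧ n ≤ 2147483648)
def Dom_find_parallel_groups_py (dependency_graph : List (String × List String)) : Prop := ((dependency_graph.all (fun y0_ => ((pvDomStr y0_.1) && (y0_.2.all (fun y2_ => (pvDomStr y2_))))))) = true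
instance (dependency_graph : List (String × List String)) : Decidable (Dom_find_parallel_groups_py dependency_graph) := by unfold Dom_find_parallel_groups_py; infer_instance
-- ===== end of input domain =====

-- B: one comprehension with an any-scan per key instead of A's pre-built union set + set difference (simpler decomposition, same results).
-- ===== PORT A =====
def find_parallel_groups_py (dependency_graph : List (String × List String)) : List (List String) :=
  -- dependent_tasks = set(); for dependents in dependency_graph.values(): dependent_tasks.update(dependents)
  let dependent_tasks : PySem.Set String :=
    dependency_graph.foldl (fun s kv => PySem.Set.update s kv.2) PySem.Set.empty
  -- all_tasks = set(dependency_graph.keys())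
  let all_tasks : PySem.Set String := PySem.Set.ofList (dependency_graph.map Prod.fst)
  -- independent_tasks = all_tasks - dependent_tasks
  let independent_tasks : PySem.Set String := PySem.Set.diff all_tasks dependent_tasks
  -- [independent_tasks] if independent_tasks else []
  if independent_tasks.isEmpty then [] else [independent_tasks]

-- ===== PORT B =====
def find_parallel_groups_py_alt (dependency_graph : List (String × List String)) : List (List String) :=
  -- {t for t in dependency_graph if not any(t in deps for deps in dependency_graph.values())}
  let independent : PySem.Set String :=
    PySem.Set.ofList ((dependency_graph.map Prod.fst).filter
      (fun t => !(dependency_graph.any (fun kv => PySem.Set.contains kv.2 t))))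
  -- [independent] if independent else []
  if independent.isEmpty then [] else [independent]

-- ===== PRECONDITION & SPEC =====
def Spec_find_parallel_groups_py (dependency_graph : List (String × List String)) (out : List (List String)) : Prop := out = find_parallel_groups_py_alt dependency_graph
instance (dependency_graph : List (String × List String)) (out : List (List String)) : Decidable (Spec_find_parallel_groups_py dependency_graph out) := by unfold Spec_find_parallel_groups_py; infer_instance

-- ===== CLAIM (what is proved, stated in full; the proofs are below) =====
def Claim_equal_find_parallel_groups_py : Prop := ∀ (dependency_graph : List (String × List String)), Dom_find_parallel_groups_py dependency_graph → Spec_find_parallel_groups_py dependency_graph (find_parallel_groups_py dependency_graph)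

-- ===== LEMMAS AND PROOFS =====

-- x is in the accumulated union of dependency sets iff some entry's set contains it
theorem mem_dep_fold (g : List (String × List String)) (s : PySem.Set String) (x : String) :
    x ∈ g.foldl (fun s kv => PySem.Set.update s kv.2) s ↔ x ∈ s ∨ ∃ kv ∈ g, x ∈ kv.2 := by
  induction g generalizing s with
  | nil => simp
  | cons kv g ih =>
      simp only [List.foldl_cons, ih, PySem.Set.mem_update, List.mem_cons]
      constructor
      · rintro (⟨h | h⟩ | ⟨p, hp, hx⟩)
        · exact Or.inl h
        · exact Or.inr ⟨kv, Or.inl rfl, h⟩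
        · exact Or.inr ⟨p, Or.inr hp, hx⟩
      · rintro (h | ⟨p, (rfl | hp), hx⟩)
        · exact Or.inl (Or.inl h)
        · exact Or.inl (Or.inr hx)
        · exact Or.inr ⟨p, hp, hx⟩

-- filtering with p absorbs a discard of an element p rejects
theorem filter_discard_of_neg (s : List String) (p : String → Bool) (x : String)
    (hx : p x = false) : (PySem.Set.discard s x).filter p = s.filter p := by
  simp only [PySem.Set.discard, List.filter_filter]
  refine List.filter_congr (fun y _ => ?_)
  by_cases hxy : y = x
  · subst hxy; simp [hx]
  · simp [hxy]

theorem discard_filter (l : List String) (p : String → Bool) (x : String) :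
    PySem.Set.discard (l.filter p) x = (PySem.Set.discard l x).filter p := by
  simp only [PySem.Set.discard, List.filter_filter]
  exact List.filter_congr (fun y _ => Bool.and_comm _ _)

-- set-comprehension over a filtered list = filtering the set
theorem ofList_filter (l : List String) (p : String → Bool) :
    PySem.Set.ofList (l.filter p) = (PySem.Set.ofList l).filter p := by
  induction l with
  | nil => rfl
  | cons x l ih =>
      by_cases hx : p x = true
      · rw [List.filter_cons_of_pos hx, PySem.Set.ofList_cons, PySem.Set.ofList_cons,
          List.filter_cons_of_pos hx, ih, discard_filter]
      · have hx' : p x = false := by simpa using hx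
        rw [List.filter_cons_of_neg (by simp [hx']), PySem.Set.ofList_cons,
          List.filter_cons_of_neg (by simp [hx']), ih, filter_discard_of_neg _ _ _ hx']

-- the two independent-task sets coincide
theorem independent_eq (g : List (String × List String)) :
    PySem.Set.diff (PySem.Set.ofList (g.map Prod.fst))
      (g.foldl (fun s kv => PySem.Set.update s kv.2) PySem.Set.empty)
    = PySem.Set.ofList ((g.map Prod.fst).filter
        (fun t => !(g.any (fun kv => PySem.Set.contains kv.2 t)))) := by
  rw [ofList_filter]
  simp only [PySem.Set.diff]
  refine List.filter_congr (fun y _ => ?_)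
  have h1 : PySem.Set.contains (g.foldl (fun s kv => PySem.Set.update s kv.2) PySem.Set.empty) y
      = g.any (fun kv => PySem.Set.contains kv.2 y) := by
    rw [Bool.eq_iff_iff]
    simp [mem_dep_fold, List.any_eq_true, PySem.Set.empty]
  rw [h1]


-- ===== VERDICT (by name: the statement is the Claim_ definition above) =====
theorem find_parallel_groups_py_spec : Claim_equal_find_parallel_groups_py := by
  intro g _
  unfold Spec_find_parallel_groups_py
  simp only [find_parallel_groups_py, find_parallel_groups_py_alt, independent_eq]
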